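-- pv_equiv track=rewrite | github.com/footroot/C12-Lecture-Backpack | CyberSecurity (CS)/Week 14/Tutorial DSA/complexity_order.py | example1
-- ===== SOURCE A (Python) =====
-- def example1(n):
--     total = 0                  # O(1)
--
--     for i in range(n):         # O(n)
--         for j in range(n):     # O(n)
--             total += i * j
--
--     for k in range(n):         # O(n)
--         total += k
--
--     return total
-- ===== SOURCE B (Python) =====
-- def example1(n):
--     s = n * (n - 1) // 2 if n > 0 else 0
--     return s * s + s
-- ===== Notes on version B (the rewrite author's own statement) =====
-- stated objective: faster
-- what changed: Replaced the quadratic nested loops by the Gauss closed form: with S the triangular number of n-1, the result is S*S + S.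
import Mathlib
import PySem

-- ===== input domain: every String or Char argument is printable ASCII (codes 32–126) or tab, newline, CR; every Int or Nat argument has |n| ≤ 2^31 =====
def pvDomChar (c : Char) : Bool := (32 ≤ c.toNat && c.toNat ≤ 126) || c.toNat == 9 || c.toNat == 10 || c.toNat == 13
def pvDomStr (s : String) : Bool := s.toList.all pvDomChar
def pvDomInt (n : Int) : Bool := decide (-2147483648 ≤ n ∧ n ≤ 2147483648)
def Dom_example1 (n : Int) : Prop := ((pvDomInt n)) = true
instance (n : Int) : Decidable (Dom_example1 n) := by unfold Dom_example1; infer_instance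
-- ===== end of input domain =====

-- B replaces A's O(n^2) nested loops by the closed form S*S + S with S = n(n-1)//2 (asymptotically faster).


-- ===== PORT A =====
def example1 (n : Int) : Int :=
  let total : Int := 0
  let total := (PySem.List.pyRange 0 n 1).foldl
    (fun total i => (PySem.List.pyRange 0 n 1).foldl (fun total j => total + i * j) total) total
  let total := (PySem.List.pyRange 0 n 1).foldl (fun total k => total + k) total
  total

-- ===== PORT B =====
def example1_alt (n : Int) : Int :=
  let s : Int := if n > 0 then PySem.Int.floordiv (n * (n - 1)) 2 else 0
  s * s + s

-- ===== PRECONDITION & SPEC =====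
def Spec_example1 (n : Int) (out : Int) : Prop := out = example1_alt n
instance (n : Int) (out : Int) : Decidable (Spec_example1 n out) := by unfold Spec_example1; infer_instance

-- ===== CLAIM (what is proved, stated in full; the proofs are below) =====
def Claim_equal_example1 : Prop := ∀ (n : Int), Dom_example1 n → Spec_example1 n (example1 n)

-- ===== LEMMAS AND PROOFS =====

-- triangular-number step, in Nat
theorem pv_tri_succ (m : Nat) : (m + 1) * (m + 1 - 1) / 2 = m * (m - 1) / 2 + m := by
  have key : (m + 1) * (m + 1 - 1) = m * (m - 1) + 2 * m := by
    cases m with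
    | zero => rfl
    | succ k => simp only [Nat.add_sub_cancel]; ring
  have e2 : 2 ∣ m * (m - 1) := by
    cases m with
    | zero => simp
    | succ k => simpa [Nat.mul_comm] using (Nat.even_mul_succ_self k).two_dvd
  omega

theorem pv_tri_succ_int (m : Nat) :
    (((m + 1) * (m + 1 - 1) / 2 : Nat) : Int) = ((m * (m - 1) / 2 : Nat) : Int) + (m : Int) := by
  exact_mod_cast congrArg (Nat.cast : Nat → Int) (pv_tri_succ m)

-- sum of 'acc + c * k' over range 0..m-1
theorem pv_fold_mul (m : Nat) (c t : Int) :
    (PySem.List.pyRange 0 (m : Int) 1).foldl (fun acc j => acc + c * j) t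
      = t + c * ((m * (m - 1) / 2 : Nat) : Int) := by
  induction m generalizing t with
  | zero => simp [PySem.List.pyRange_one_eq_nil]
  | succ m ih =>
    rw [show ((m + 1 : Nat) : Int) = (m : Int) + 1 by push_cast; ring,
      PySem.List.pyRange_one_succ_right (by positivity), List.foldl_append, ih]
    simp only [List.foldl]
    rw [pv_tri_succ_int]; ring

theorem pv_fold_add (m : Nat) (t : Int) :
    (PySem.List.pyRange 0 (m : Int) 1).foldl (fun acc k => acc + k) t
      = t + ((m * (m - 1) / 2 : Nat) : Int) := by
  simpa using pv_fold_mul m 1 t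

-- outer loop: each pass adds i * S(p)
theorem pv_fold_outer (p m : Nat) (t : Int) :
    (PySem.List.pyRange 0 (m : Int) 1).foldl
      (fun acc i => (PySem.List.pyRange 0 (p : Int) 1).foldl (fun acc j => acc + i * j) acc) t
      = t + ((p * (p - 1) / 2 : Nat) : Int) * ((m * (m - 1) / 2 : Nat) : Int) := by
  induction m generalizing t with
  | zero => simp [PySem.List.pyRange_one_eq_nil]
  | succ m ih =>
    rw [show ((m + 1 : Nat) : Int) = (m : Int) + 1 by push_cast; ring,
      PySem.List.pyRange_one_succ_right (by positivity), List.foldl_append, ih]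
    simp only [List.foldl]
    rw [pv_fold_mul, pv_tri_succ_int]; ring

-- ===== VERDICT (by name: the statement is the Claim_ definition above) =====
theorem example1_spec : Claim_equal_example1 := by
  intro n _
  unfold Spec_example1
  have hr : PySem.List.pyRange 0 n 1 = PySem.List.pyRange 0 ((n.toNat : Int)) 1 := by
    have h0 : ((n.toNat : Int) - 0).toNat = (n - 0).toNat := by omega
    rw [PySem.List.pyRange_one, PySem.List.pyRange_one, h0]
  simp only [example1, example1_alt, hr, pv_fold_outer n.toNat n.toNat, pv_fold_add, zero_add]
  by_cases hn : n > 0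
  · obtain ⟨m, hm1, rfl⟩ : ∃ m : Nat, 1 ≤ m ∧ n = (m : Int) := ⟨n.toNat, by omega, by omega⟩
    rw [if_pos hn]
    simp only [Int.toNat_natCast]
    have hc : (m : Int) * ((m : Int) - 1) = ((m * (m - 1) : Nat) : Int) := by
      push_cast [Nat.cast_sub hm1]; ring
    rw [hc]
    have hs : ∀ k : Nat, PySem.Int.floordiv ((k : Nat) : Int) 2 = ((k / 2 : Nat) : Int) := by
      intro k
      have h2 : ((k : Int)).fdiv 2 = (k : Int) / 2 := Int.fdiv_eq_ediv_of_nonneg _ (by positivity)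
      simp only [PySem.Int.floordiv, h2]; omega
    rw [hs]
  · rw [if_neg hn]
    have hm : n.toNat = 0 := by omega
    rw [hm]; norm_num
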